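-- pv_equiv track=rewrite | github.com/zhang123233123123/the-secondary-task | llm_clients.py | detect_refusal
-- ===== SOURCE A (Python) =====
-- def detect_refusal(text: str) -> bool:
--     lowered = text.lower()
--     markers = (
--         "i can't help with",
--         "i cannot help with",
--         "i can't assist with",
--         "i cannot assist with",
--         "i can't provide",
--         "i cannot provide",
--     )
--     return any(marker in lowered for marker in markers)
-- ===== SOURCE B (Python) =====
-- def detect_refusal(text: str) -> bool:
--     s = text.lower()
--     for i in range(len(s)):
--         if not s.startswith("i can", i):
--             continue
--         j = i + 5
--         if s.startswith("not", j):
--             j += 3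
--         elif s.startswith("'t", j):
--             j += 2
--         else:
--             continue
--         if (s.startswith(" help with", j)
--                 or s.startswith(" assist with", j)
--                 or s.startswith(" provide", j)):
--             return True
--     return False
-- ===== Notes on version B (the rewrite author's own statement) =====
-- stated objective: alternative
-- what changed: Replaced six independent substring scans over the lowered text with a single left-to-right scan whose per-position matcher follows the markers' shared structure: common five-character stem, then one of two negation forms, then one of three verb tails.
import Mathlib
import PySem

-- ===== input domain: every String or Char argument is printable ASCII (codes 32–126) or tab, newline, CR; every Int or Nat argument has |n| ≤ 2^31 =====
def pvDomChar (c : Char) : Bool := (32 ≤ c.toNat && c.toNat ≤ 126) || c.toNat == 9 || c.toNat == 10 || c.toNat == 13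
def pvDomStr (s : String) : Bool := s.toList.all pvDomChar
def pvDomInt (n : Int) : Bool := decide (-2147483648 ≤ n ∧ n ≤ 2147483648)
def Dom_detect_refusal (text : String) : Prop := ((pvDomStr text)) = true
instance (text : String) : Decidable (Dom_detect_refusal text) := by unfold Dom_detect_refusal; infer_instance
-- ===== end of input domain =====

-- B replaces the six independent substring scans with one left-to-right scan that
-- matches the markers' shared structure ("i can" + "'t"/"not" + one of three tails); objective: alternative.

-- ===== PORT A =====
def detect_refusal (text : String) : Bool :=
  let lowered := PySem.Str.lower text
  (PySem.Str.isIn "i can't help with" lowered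
    || PySem.Str.isIn "i cannot help with" lowered
    || PySem.Str.isIn "i can't assist with" lowered
    || PySem.Str.isIn "i cannot assist with" lowered
    || PySem.Str.isIn "i can't provide" lowered
    || PySem.Str.isIn "i cannot provide" lowered)

-- ===== PORT B =====
-- s.startswith(p, j) on a List Char is p.isPrefixOf (s.drop j); the scan walks suffixes.
def altCheck (s : List Char) : Bool :=
  if "i can".toList.isPrefixOf s then
    if "not".toList.isPrefixOf (s.drop 5) then
      (" help with".toList.isPrefixOf (s.drop 8)
        || " assist with".toList.isPrefixOf (s.drop 8)
        || " provide".toList.isPrefixOf (s.drop 8))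
    else if "'t".toList.isPrefixOf (s.drop 5) then
      (" help with".toList.isPrefixOf (s.drop 7)
        || " assist with".toList.isPrefixOf (s.drop 7)
        || " provide".toList.isPrefixOf (s.drop 7))
    else false
  else false

def altScan : List Char → Bool
  | [] => false
  | c :: rest => altCheck (c :: rest) || altScan rest

def detect_refusal_alt (text : String) : Bool :=
  altScan (PySem.Chars.lower text.toList)

-- ===== PRECONDITION & SPEC =====
def Spec_detect_refusal (text : String) (out : Bool) : Prop := out = detect_refusal_alt text
instance (text : String) (out : Bool) : Decidable (Spec_detect_refusal text out) := by unfold Spec_detect_refusal; infer_instance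

-- ===== CLAIM (what is proved, stated in full; the proofs are below) =====
def Claim_equal_detect_refusal : Prop := ∀ (text : String), Dom_detect_refusal text → Spec_detect_refusal text (detect_refusal text)

-- ===== LEMMAS AND PROOFS =====

theorem pv_prefix_append_iff (a b s : List Char) :
    (a ++ b) <+: s ↔ a <+: s ∧ b <+: s.drop a.length := by
  induction a generalizing s with
  | nil => simp
  | cons x xs ih =>
    cases s with
    | nil => simp
    | cons y ys => simp [List.cons_prefix_cons, ih, and_assoc]

theorem pv_split3 (a b c s : List Char) :
    (a ++ (b ++ c)) <+: s ↔
      a <+: s ∧ b <+: s.drop a.length ∧ c <+: (s.drop a.length).drop b.length := by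
  rw [pv_prefix_append_iff, pv_prefix_append_iff]

theorem pv_not_not_tick (t : List Char) :
    "not".toList <+: t → "'t".toList <+: t → False := by
  intro h1 h2
  cases t with
  | nil => exact absurd (List.prefix_nil.mp h1) (by decide)
  | cons x xs =>
    rw [show "not".toList = 'n' :: "ot".toList from rfl, List.cons_prefix_cons] at h1
    rw [show "'t".toList = '\'' :: "t".toList from rfl, List.cons_prefix_cons] at h2
    exact absurd (h1.1.trans h2.1.symm) (by decide)

theorem pv_altCheck_iff (s : List Char) : altCheck s = true ↔
    ("i can't help with".toList <+: s ∨ "i cannot help with".toList <+: s ∨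
     "i can't assist with".toList <+: s ∨ "i cannot assist with".toList <+: s ∨
     "i can't provide".toList <+: s ∨ "i cannot provide".toList <+: s) := by
  have e1 : ("i can't help with".toList <+: s) ↔
      ("i can".toList <+: s ∧ "'t".toList <+: s.drop 5 ∧ " help with".toList <+: s.drop 7) := by
    rw [show "i can't help with".toList = "i can".toList ++ ("'t".toList ++ " help with".toList) from rfl,
      pv_split3]
    simp [List.drop_drop]
  have e2 : ("i cannot help with".toList <+: s) ↔
      ("i can".toList <+: s ∧ "not".toList <+: s.drop 5 ∧ " help with".toList <+: s.drop 8) := by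
    rw [show "i cannot help with".toList = "i can".toList ++ ("not".toList ++ " help with".toList) from rfl,
      pv_split3]
    simp [List.drop_drop]
  have e3 : ("i can't assist with".toList <+: s) ↔
      ("i can".toList <+: s ∧ "'t".toList <+: s.drop 5 ∧ " assist with".toList <+: s.drop 7) := by
    rw [show "i can't assist with".toList = "i can".toList ++ ("'t".toList ++ " assist with".toList) from rfl,
      pv_split3]
    simp [List.drop_drop]
  have e4 : ("i cannot assist with".toList <+: s) ↔
      ("i can".toList <+: s ∧ "not".toList <+: s.drop 5 ∧ " assist with".toList <+: s.drop 8) := by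
    rw [show "i cannot assist with".toList = "i can".toList ++ ("not".toList ++ " assist with".toList) from rfl,
      pv_split3]
    simp [List.drop_drop]
  have e5 : ("i can't provide".toList <+: s) ↔
      ("i can".toList <+: s ∧ "'t".toList <+: s.drop 5 ∧ " provide".toList <+: s.drop 7) := by
    rw [show "i can't provide".toList = "i can".toList ++ ("'t".toList ++ " provide".toList) from rfl,
      pv_split3]
    simp [List.drop_drop]
  have e6 : ("i cannot provide".toList <+: s) ↔
      ("i can".toList <+: s ∧ "not".toList <+: s.drop 5 ∧ " provide".toList <+: s.drop 8) := by
    rw [show "i cannot provide".toList = "i can".toList ++ ("not".toList ++ " provide".toList) from rfl,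
      pv_split3]
    simp [List.drop_drop]
  rw [e1, e2, e3, e4, e5, e6]
  unfold altCheck
  split_ifs with h1 h2 h3
  · -- "i can" and "not"
    have hno : ¬ "'t".toList.isPrefixOf (s.drop 5) = true := by
      intro h
      exact pv_not_not_tick (s.drop 5) (List.isPrefixOf_iff_prefix.mp h2) (List.isPrefixOf_iff_prefix.mp h)
    simp only [Bool.or_eq_true, List.isPrefixOf_iff_prefix] at *
    constructor
    · rintro ((h | h) | h)
      · exact Or.inr (Or.inl ⟨h1, h2, h⟩)
      · exact Or.inr (Or.inr (Or.inr (Or.inl ⟨h1, h2, h⟩)))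
      · exact Or.inr (Or.inr (Or.inr (Or.inr (Or.inr ⟨h1, h2, h⟩))))
    · rintro (⟨_, h, _⟩ | ⟨_, _, h⟩ | ⟨_, h, _⟩ | ⟨_, _, h⟩ | ⟨_, h, _⟩ | ⟨_, _, h⟩)
      · exact absurd (pv_not_not_tick _ h2 h) (by simp)
      · exact Or.inl (Or.inl h)
      · exact absurd (pv_not_not_tick _ h2 h) (by simp)
      · exact Or.inl (Or.inr h)
      · exact absurd (pv_not_not_tick _ h2 h) (by simp)
      · exact Or.inr h
  · -- "i can" and "'t" (not "not")
    simp only [Bool.or_eq_true, List.isPrefixOf_iff_prefix] at *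
    constructor
    · rintro ((h | h) | h)
      · exact Or.inl ⟨h1, h3, h⟩
      · exact Or.inr (Or.inr (Or.inl ⟨h1, h3, h⟩))
      · exact Or.inr (Or.inr (Or.inr (Or.inr (Or.inl ⟨h1, h3, h⟩))))
    · rintro (⟨_, _, h⟩ | ⟨_, h, _⟩ | ⟨_, _, h⟩ | ⟨_, h, _⟩ | ⟨_, _, h⟩ | ⟨_, h, _⟩)
      · exact Or.inl (Or.inl h)
      · exact absurd h h2
      · exact Or.inl (Or.inr h)
      · exact absurd h h2
      · exact Or.inr h
      · exact absurd h h2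
  · -- "i can" but neither "not" nor "'t"
    simp only [List.isPrefixOf_iff_prefix] at *
    constructor
    · intro h; exact absurd h (by simp)
    · rintro (⟨_, h, _⟩ | ⟨_, h, _⟩ | ⟨_, h, _⟩ | ⟨_, h, _⟩ | ⟨_, h, _⟩ | ⟨_, h, _⟩) <;>
        first | exact absurd h h3 | exact absurd h h2
  · -- no "i can"
    simp only [List.isPrefixOf_iff_prefix] at *
    constructor
    · intro h; exact absurd h (by simp)
    · rintro (⟨h, _, _⟩ | ⟨h, _, _⟩ | ⟨h, _, _⟩ | ⟨h, _, _⟩ | ⟨h, _, _⟩ | ⟨h, _, _⟩) <;> exact absurd h h1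

theorem pv_altScan_iff (s : List Char) : altScan s = true ↔ ∃ j, altCheck (s.drop j) = true := by
  induction s with
  | nil => simp [altScan, altCheck]
  | cons c rest ih =>
    simp only [altScan, Bool.or_eq_true, ih]
    constructor
    · rintro (h | ⟨j, hj⟩)
      · exact ⟨0, h⟩
      · exact ⟨j + 1, hj⟩
    · rintro ⟨j, hj⟩
      cases j with
      | zero => exact Or.inl hj
      | succ k => exact Or.inr ⟨k, hj⟩

-- ===== VERDICT (by name: the statement is the Claim_ definition above) =====
set_option maxHeartbeats 1000000 in
theorem detect_refusal_spec : Claim_equal_detect_refusal := by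
  intro text _
  unfold Spec_detect_refusal detect_refusal detect_refusal_alt
  rw [Bool.eq_iff_iff]
  simp only [Bool.or_eq_true, PySem.Str.isIn_iff_infix, PySem.Str.toList_lower,
    pv_altScan_iff, pv_altCheck_iff, exists_or,
    PySem.Chars.exists_prefix_drop_iff_isIn, PySem.Chars.isIn_iff_infix, or_assoc]
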